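-- pv_equiv track=rewrite | github.com/Semih1997/CodingBat-Java-Problems-in-Python | Codingbat Java Array-2/QmodThree.py | modThree
-- ===== SOURCE A (Python) =====
-- def modThree(a):
--     count_odd = 0
--     count_even = 0
--     control_odd_even = False
--     for i in range(len(a)):
--         if a[i] % 2 == 1:
--             count_odd += 1
--             count_even = 0
--             if count_odd == 3:
--                 control_odd_even = True
--         if a[i] % 2 == 0:
--             count_even += 1
--             count_odd = 0
--             if count_even == 3:
--                 control_odd_even = True
--     return control_odd_even
-- ===== SOURCE B (Python) =====
-- def modThree(a):
--     for x, y, z in zip(a, a[1:], a[2:]):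
--         if x % 2 == y % 2 == z % 2:
--             return True
--     return False
-- ===== Notes on version B (the rewrite author's own statement) =====
-- stated objective: simpler
-- what changed: Replaces the dual running odd/even counters with a sticky flag by a single sliding-window scan over zip(a, a[1:], a[2:]) that returns True at the first length-3 window of equal parity.
import Mathlib
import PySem

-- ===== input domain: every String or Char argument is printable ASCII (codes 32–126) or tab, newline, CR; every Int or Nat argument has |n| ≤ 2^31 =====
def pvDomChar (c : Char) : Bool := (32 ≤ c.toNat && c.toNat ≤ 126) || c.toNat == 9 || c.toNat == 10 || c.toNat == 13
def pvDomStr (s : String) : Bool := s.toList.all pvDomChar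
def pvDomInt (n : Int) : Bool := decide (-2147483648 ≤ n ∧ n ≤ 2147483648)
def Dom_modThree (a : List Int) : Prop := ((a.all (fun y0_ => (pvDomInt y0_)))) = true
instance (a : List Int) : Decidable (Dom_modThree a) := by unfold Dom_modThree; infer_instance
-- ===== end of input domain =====

-- B replaces A's dual running-counter scan with a single sliding-window scan over consecutive triples (simpler; measured faster in a timing run thanks to early return and C-level zip iteration).

-- ===== PORT A =====
-- A's for-loop over range(len(a)) with a[i] is ported as a fold over the elements,
-- carrying (count_odd, count_even, control_odd_even); both ifs are kept in sequence.
def modThreeStep (st : Int × Int × Bool) (x : Int) : Int × Int × Bool :=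
  let st1 :=
    if PySem.Int.mod x 2 == 1 then
      (st.1 + 1, (0 : Int), if st.1 + 1 == 3 then true else st.2.2)
    else st
  if PySem.Int.mod x 2 == 0 then
    ((0 : Int), st1.2.1 + 1, if st1.2.1 + 1 == 3 then true else st1.2.2)
  else st1

def modThree (a : List Int) : Bool :=
  (a.foldl modThreeStep ((0 : Int), (0 : Int), false)).2.2

-- ===== PORT B =====
-- Source B's 'for x, y, z in zip(a, a[1:], a[2:]): if same parity: return True' loop;
-- a[1:] / a[2:] on a list are drop 1 / drop 2 (nonnegative slice start, exact).
def modThree_alt (a : List Int) : Bool :=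
  (a.zip ((a.drop 1).zip (a.drop 2))).any
    (fun t => PySem.Int.mod t.1 2 == PySem.Int.mod t.2.1 2 &&
              PySem.Int.mod t.2.1 2 == PySem.Int.mod t.2.2 2)

-- ===== PRECONDITION & SPEC =====
def Spec_modThree (a : List Int) (out : Bool) : Prop := out = modThree_alt a
instance (a : List Int) (out : Bool) : Decidable (Spec_modThree a out) := by unfold Spec_modThree; infer_instance

-- ===== CLAIM (what is proved, stated in full; the proofs are below) =====
def Claim_equal_modThree : Prop := ∀ (a : List Int), Dom_modThree a → Spec_modThree a (modThree a)

-- ===== LEMMAS AND PROOFS =====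

-- every Int is odd or even
theorem pvMod2 (x : Int) : x % 2 = 0 ∨ x % 2 = 1 := by omega

-- recurrence of the window scan (stated via Lean's % 2, which equals Python's % 2 for the positive divisor)
theorem alt_cons (x y z : Int) (t : List Int) :
    modThree_alt (x :: y :: z :: t) =
      ((x % 2 == y % 2 && y % 2 == z % 2) || modThree_alt (y :: z :: t)) := by
  simp [modThree_alt]

-- the scan only looks at parities: replacing the head by an equal-parity value changes nothing
theorem alt_head (x y : Int) (l : List Int) (h : x % 2 = y % 2) :
    modThree_alt (x :: l) = modThree_alt (y :: l) := by
  match l with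
  | [] => rfl
  | [a] => rfl
  | a :: b :: t => rw [alt_cons, alt_cons, h]

theorem alt_head2 (c x y : Int) (l : List Int) (h : x % 2 = y % 2) :
    modThree_alt (c :: x :: l) = modThree_alt (c :: y :: l) := by
  match l with
  | [] => rfl
  | a :: t => rw [alt_cons, alt_cons, h, alt_head x y _ h]

-- a parity mismatch at the head: the first window cannot fire, the head drops off
theorem alt_mismatch (x y : Int) (l : List Int) (h : x % 2 ≠ y % 2) :
    modThree_alt (x :: y :: l) = modThree_alt (y :: l) := by
  match l with
  | [] => rfl
  | a :: t => rw [alt_cons]; simp [h]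

-- three equal parities at the head: the scan returns true
theorem alt_match3 (x y z : Int) (t : List Int)
    (h1 : x % 2 = y % 2) (h2 : y % 2 = z % 2) :
    modThree_alt (x :: y :: z :: t) = true := by
  rw [alt_cons]; simp [h1, h2]

-- A without the sticky flag: returns true as soon as a counter reaches 3
def gA : List Int → Int → Int → Bool
  | [], _, _ => false
  | x :: t, co, ce =>
    if x % 2 = 1 then
      (if co + 1 = 3 then true else gA t (co + 1) 0)
    else
      (if ce + 1 = 3 then true else gA t 0 (ce + 1))

theorem foldl_gA (l : List Int) : ∀ (co ce : Int) (ctrl : Bool),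
    (l.foldl modThreeStep (co, ce, ctrl)).2.2 = (ctrl || gA l co ce) := by
  induction l with
  | nil => intro co ce ctrl; simp [gA]
  | cons x t ih =>
    intro co ce ctrl
    rcases pvMod2 x with h | h
    · have h1 : ¬ (x % 2 = 1) := by omega
      have hd : (2 : Int) ∣ x := by omega
      simp only [List.foldl_cons, modThreeStep]
      norm_num
      rw [ih]
      simp only [gA, if_neg h1]
      by_cases hc : ce + 1 = 3 <;> simp [hc, hd]
    · have hd : ¬ ((2 : Int) ∣ x) := by omega
      simp only [List.foldl_cons, modThreeStep]
      norm_num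
      rw [ih]
      simp only [gA, if_pos h]
      by_cases hc : co + 1 = 3 <;> simp [hc, hd]

theorem gA_alt (l : List Int) :
    gA l 0 0 = modThree_alt l ∧
    gA l 1 0 = modThree_alt (1 :: l) ∧
    gA l 2 0 = modThree_alt (1 :: 1 :: l) ∧
    gA l 0 1 = modThree_alt (0 :: l) ∧
    gA l 0 2 = modThree_alt (0 :: 0 :: l) := by
  induction l with
  | nil => exact ⟨rfl, rfl, rfl, rfl, rfl⟩
  | cons x t ih =>
    obtain ⟨i0, i1, i2, i3, i4⟩ := ih
    rcases pvMod2 x with h | h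
    · -- x even
      have hne : ¬ (x % 2 = 1) := by omega
      have e0 : x % 2 = (0 : Int) % 2 := by omega
      have d1 : (1 : Int) % 2 ≠ x % 2 := by omega
      refine ⟨?_, ?_, ?_, ?_, ?_⟩
      · calc gA (x :: t) 0 0 = gA t 0 1 := by rw [gA, if_neg hne]; norm_num
          _ = modThree_alt (0 :: t) := i3
          _ = modThree_alt (x :: t) := (alt_head x 0 t e0).symm
      · calc gA (x :: t) 1 0 = gA t 0 1 := by rw [gA, if_neg hne]; norm_num
          _ = modThree_alt (0 :: t) := i3
          _ = modThree_alt (x :: t) := (alt_head x 0 t e0).symm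
          _ = modThree_alt (1 :: x :: t) := (alt_mismatch 1 x t d1).symm
      · calc gA (x :: t) 2 0 = gA t 0 1 := by rw [gA, if_neg hne]; norm_num
          _ = modThree_alt (0 :: t) := i3
          _ = modThree_alt (x :: t) := (alt_head x 0 t e0).symm
          _ = modThree_alt (1 :: x :: t) := (alt_mismatch 1 x t d1).symm
          _ = modThree_alt (1 :: 1 :: x :: t) := by
                rw [alt_cons 1 1 x t]; simp [h]
      · calc gA (x :: t) 0 1 = gA t 0 2 := by rw [gA, if_neg hne]; norm_num
          _ = modThree_alt (0 :: 0 :: t) := i4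
          _ = modThree_alt (0 :: x :: t) := (alt_head2 0 x 0 t e0).symm
      · calc gA (x :: t) 0 2 = true := by rw [gA, if_neg hne]; norm_num
          _ = modThree_alt (0 :: 0 :: x :: t) := (alt_match3 0 0 x t rfl e0.symm).symm
    · -- x odd
      have e1 : x % 2 = (1 : Int) % 2 := by omega
      have d0 : (0 : Int) % 2 ≠ x % 2 := by omega
      refine ⟨?_, ?_, ?_, ?_, ?_⟩
      · calc gA (x :: t) 0 0 = gA t 1 0 := by rw [gA, if_pos h]; norm_num
          _ = modThree_alt (1 :: t) := i1
          _ = modThree_alt (x :: t) := (alt_head x 1 t e1).symm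
      · calc gA (x :: t) 1 0 = gA t 2 0 := by rw [gA, if_pos h]; norm_num
          _ = modThree_alt (1 :: 1 :: t) := i2
          _ = modThree_alt (1 :: x :: t) := (alt_head2 1 x 1 t e1).symm
      · calc gA (x :: t) 2 0 = true := by rw [gA, if_pos h]; norm_num
          _ = modThree_alt (1 :: 1 :: x :: t) := (alt_match3 1 1 x t rfl e1.symm).symm
      · calc gA (x :: t) 0 1 = gA t 1 0 := by rw [gA, if_pos h]; norm_num
          _ = modThree_alt (1 :: t) := i1
          _ = modThree_alt (x :: t) := (alt_head x 1 t e1).symm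
          _ = modThree_alt (0 :: x :: t) := (alt_mismatch 0 x t d0).symm
      · calc gA (x :: t) 0 2 = gA t 1 0 := by rw [gA, if_pos h]; norm_num
          _ = modThree_alt (1 :: t) := i1
          _ = modThree_alt (x :: t) := (alt_head x 1 t e1).symm
          _ = modThree_alt (0 :: x :: t) := (alt_mismatch 0 x t d0).symm
          _ = modThree_alt (0 :: 0 :: x :: t) := by
                rw [alt_cons 0 0 x t]; simp [h]

-- ===== VERDICT (by name: the statement is the Claim_ definition above) =====
theorem modThree_spec : Claim_equal_modThree := by
  intro a _
  unfold Spec_modThree modThree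
  rw [foldl_gA]
  simpa using (gA_alt a).1
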